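-- pv_equiv track=rewrite | github.com/FlowElement-ai/mflow-benchmarks | benchmarks/longmemeval-cognee/scripts/cognee_evaluate.py | _clean_context
-- ===== SOURCE A (Python) =====
-- def _clean_context(text: str) -> str:
--     text = text.replace("__node_content_start__", "")
--     text = text.replace("__node_content_end__", "")
--     lines = []
--     for line in text.split("\n"):
--         s = line.strip()
--         if s:
--             lines.append(line)
--         elif lines and lines[-1].strip():
--             lines.append("")
--     return "\n".join(lines).strip()
-- ===== SOURCE B (Python) =====
-- from itertools import groupby
--
--
-- def _clean_context(text: str) -> str:
--     text = text.replace("__node_content_start__", "")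
--     text = text.replace("__node_content_end__", "")
--     runs = [
--         "\n".join(group)
--         for is_blank, group in groupby(text.split("\n"), key=lambda l: not l.strip())
--         if not is_blank
--     ]
--     return "\n\n".join(runs).strip()
-- ===== Notes on version B (the rewrite author's own statement) =====
-- stated objective: idiomatic
-- what changed: The stateful accumulator loop with a lines[-1] lookback is replaced by partitioning the lines with itertools.groupby into maximal blank/non-blank runs and joining the non-blank runs with a double newline separator.
import Mathlib
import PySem

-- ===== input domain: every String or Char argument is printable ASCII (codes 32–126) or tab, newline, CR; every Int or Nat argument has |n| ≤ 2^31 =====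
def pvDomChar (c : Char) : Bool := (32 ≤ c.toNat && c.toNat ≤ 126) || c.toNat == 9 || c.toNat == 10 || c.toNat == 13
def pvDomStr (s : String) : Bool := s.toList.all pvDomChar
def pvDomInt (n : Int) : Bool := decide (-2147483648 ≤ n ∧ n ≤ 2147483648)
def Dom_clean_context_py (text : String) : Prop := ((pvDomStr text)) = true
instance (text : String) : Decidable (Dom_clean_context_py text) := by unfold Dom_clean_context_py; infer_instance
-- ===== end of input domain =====

-- B replaces A's stateful lookback loop by grouping the lines into maximal blank/non-blank
-- runs (itertools.groupby) and joining the non-blank runs with "\n\n"; objective: idiomatic.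

-- ===== PORT A =====
-- the body of A's `for line in text.split("\n")` loop, acting on the accumulator `lines`
def pvStepA (lines : List String) (line : String) : List String :=
  if PySem.Str.strip line ≠ "" then lines ++ [line]
  else if lines ≠ [] ∧ PySem.Str.strip ((PySem.List.pyGet? lines (-1)).getD "") ≠ "" then
    lines ++ [""]
  else lines

def clean_context_py (text : String) : String :=
  let t1 := PySem.Str.replace text "__node_content_start__" ""
  let t2 := PySem.Str.replace t1 "__node_content_end__" ""
  let lines := ((PySem.Str.split? t2 "\n").getD []).foldl pvStepA []
  PySem.Str.strip (PySem.Str.join "\n" lines)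

-- ===== PORT B =====
-- itertools.groupby: maximal runs of lines sharing the key, with their key, in order
def pvGroupBy (key : String → Bool) : List String → List (Bool × List String)
  | [] => []
  | x :: xs =>
    match pvGroupBy key xs with
    | [] => [(key x, [x])]
    | (k, g) :: rest =>
      if key x = k then (k, x :: g) :: rest else (key x, [x]) :: (k, g) :: rest

def clean_context_py_alt (text : String) : String :=
  let t1 := PySem.Str.replace text "__node_content_start__" ""
  let t2 := PySem.Str.replace t1 "__node_content_end__" ""
  let runs :=
    ((pvGroupBy (fun l => PySem.Str.strip l == "") ((PySem.Str.split? t2 "\n").getD [])).filter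
        (fun p => !p.1)).map
      (fun p => PySem.Str.join "\n" p.2)
  PySem.Str.strip (PySem.Str.join "\n\n" runs)

-- ===== PRECONDITION & SPEC =====
def Spec_clean_context_py (text : String) (out : String) : Prop := out = clean_context_py_alt text
instance (text : String) (out : String) : Decidable (Spec_clean_context_py text out) := by unfold Spec_clean_context_py; infer_instance

-- ===== CLAIM (what is proved, stated in full; the proofs are below) =====
def Claim_equal_clean_context_py : Prop := ∀ (text : String), Dom_clean_context_py text → Spec_clean_context_py text (clean_context_py text)

-- ===== LEMMAS AND PROOFS =====

-- `line.strip()` is falsy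
def pvBlank (l : String) : Bool := PySem.Str.strip l == ""

-- A's loop, by mode: m = true iff the last emitted line is non-blank
def pvGMode (m : Bool) : List String → List String
  | [] => []
  | x :: xs =>
    if pvBlank x then (if m then "" :: pvGMode false xs else pvGMode false xs)
    else x :: pvGMode true xs

-- the non-blank runs, as B computes them
def pvR (ls : List String) : List (List String) :=
  ((pvGroupBy pvBlank ls).filter (fun p => !p.1)).map (·.2)

def pvEB (ls : List String) : Bool := (ls.getLast?.map pvBlank).getD false
def pvSB (ls : List String) : Bool := (ls.head?.map pvBlank).getD false

theorem pvGroupBy_cons (key : String → Bool) (x : String) (ls : List String) :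
    ∃ g rest, pvGroupBy key (x :: ls) = (key x, g) :: rest ∧ g ≠ [] := by
  unfold pvGroupBy
  cases h : pvGroupBy key ls with
  | nil => exact ⟨[x], [], rfl, by simp⟩
  | cons p rest =>
    obtain ⟨k, g⟩ := p
    by_cases hk : key x = k
    · exact ⟨x :: g, rest, by simp [hk], by simp⟩
    · exact ⟨[x], (k, g) :: rest, by simp [hk], by simp⟩

theorem pvR_blank (x : String) (ls : List String) (h : pvBlank x = true) :
    pvR (x :: ls) = pvR ls := by
  unfold pvR
  rw [pvGroupBy]
  cases hg : pvGroupBy pvBlank ls with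
  | nil => simp [h]
  | cons p rest =>
    obtain ⟨k, g⟩ := p
    cases k <;> simp [h]

theorem pvR_new (x : String) (ls : List String) (h : pvBlank x = false)
    (h2 : ls = [] ∨ pvSB ls = true) : pvR (x :: ls) = [x] :: pvR ls := by
  unfold pvR
  rw [pvGroupBy]
  cases ls with
  | nil => simp [h, pvGroupBy]
  | cons y ys =>
    obtain ⟨g, rest, hg, -⟩ := pvGroupBy_cons pvBlank y ys
    have hy : pvBlank y = true := by
      rcases h2 with h2 | h2
      · exact absurd h2 (by simp)
      · simpa [pvSB] using h2
    rw [hg]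
    simp [h, hy]

theorem pvR_merge (x : String) (ls : List String) (h : pvBlank x = false)
    (h1 : ls ≠ []) (h2 : pvSB ls = false) :
    ∃ g gs, pvR ls = g :: gs ∧ pvR (x :: ls) = (x :: g) :: gs := by
  cases ls with
  | nil => exact absurd rfl h1
  | cons y ys =>
    obtain ⟨g, rest, hg, -⟩ := pvGroupBy_cons pvBlank y ys
    have hy : pvBlank y = false := by simpa [pvSB] using h2
    refine ⟨g, (rest.filter (fun p => !p.1)).map (·.2), ?_, ?_⟩
    · unfold pvR; rw [hg]; simp [hy]
    · unfold pvR
      rw [pvGroupBy, hg]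
      simp [h, hy]

theorem pvGroups_ne (ls : List String) (p : Bool × List String)
    (h : p ∈ pvGroupBy pvBlank ls) : p.2 ≠ [] := by
  induction ls generalizing p with
  | nil => simp [pvGroupBy] at h
  | cons x xs ih =>
    rw [pvGroupBy] at h
    cases hg : pvGroupBy pvBlank xs with
    | nil =>
      rw [hg] at h
      simp at h
      simp [h]
    | cons q rest =>
      obtain ⟨k, g⟩ := q
      rw [hg] at h
      dsimp only at h
      have hq : (k, g).2 ≠ [] := ih _ (by rw [hg]; exact List.mem_cons_self ..)
      by_cases hk : pvBlank x = k
      · rw [if_pos hk] at h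
        rcases List.mem_cons.mp h with h | h
        · subst h; simp
        · exact ih _ (by rw [hg]; exact List.mem_cons_of_mem _ h)
      · rw [if_neg hk] at h
        rcases List.mem_cons.mp h with h | h
        · subst h; simp
        · exact ih _ (by rw [hg]; exact h)

theorem pvR_nil_iff (ls : List String) : pvR ls = [] ↔ ∀ l ∈ ls, pvBlank l = true := by
  induction ls with
  | nil => simp [pvR, pvGroupBy]
  | cons x xs ih =>
    by_cases hx : pvBlank x = true
    · rw [pvR_blank x xs hx]
      simp [hx, ih]
    · constructor
      · intro hR
        rcases eq_or_ne xs [] with rfl | hne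
        · rw [pvR_new x [] (by simpa using hx) (Or.inl rfl)] at hR
          simp at hR
        · by_cases hsb : pvSB xs = true
          · rw [pvR_new x xs (by simpa using hx) (Or.inr hsb)] at hR
            simp at hR
          · obtain ⟨g, gs, -, hcons⟩ :=
              pvR_merge x xs (by simpa using hx) hne (by simpa using hsb)
            rw [hcons] at hR
            simp at hR
      · intro hall
        exact absurd (hall x (List.mem_cons_self ..)) hx

theorem pvR_ne_nil_elem (ls : List String) (r : List String) (h : r ∈ pvR ls) : r ≠ [] := by
  unfold pvR at h
  obtain ⟨p, hp, rfl⟩ := List.mem_map.mp h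
  exact pvGroups_ne ls p (List.mem_of_mem_filter hp)

theorem pvInter_single (r : List String) : List.intercalate ([""] : List String) [r] = r := by
  simp [List.intercalate]

theorem pvInter_cons (r : List String) (rs : List (List String)) (h : rs ≠ []) :
    List.intercalate [""] (r :: rs) = r ++ [""] ++ List.intercalate [""] rs := by
  cases rs with
  | nil => exact absurd rfl h
  | cons q qs => simp [List.intercalate]

theorem pvInter_cons_head (x : String) (g : List String) (gs : List (List String)) :
    List.intercalate [""] ((x :: g) :: gs) = x :: List.intercalate [""] (g :: gs) := by
  cases gs with
  | nil => simp [pvInter_single]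
  | cons q qs =>
    rw [pvInter_cons (x :: g) (q :: qs) (by simp), pvInter_cons g (q :: qs) (by simp)]
    simp

-- main characterisation of A's loop output in terms of the runs
theorem pvGMode_eq (ls : List String) :
    pvGMode false ls =
      List.intercalate [""] (pvR ls) ++ (if pvEB ls = true ∧ pvR ls ≠ [] then [""] else []) ∧
    pvGMode true ls =
      (if pvSB ls = true ∧ pvR ls ≠ [] then [""] else []) ++
        List.intercalate [""] (pvR ls) ++ (if pvEB ls = true then [""] else []) := by
  induction ls with
  | nil => simp [pvGMode, pvR, pvGroupBy, pvEB, pvSB, List.intercalate]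
  | cons x xs ih =>
    obtain ⟨ih2, ih1⟩ := ih
    by_cases hx : pvBlank x = true
    · have hR := pvR_blank x xs hx
      cases xs with
      | nil =>
        constructor <;> simp [pvGMode, hx, pvR, pvGroupBy, pvEB, pvSB, List.intercalate]
      | cons y ys =>
        have hEB : pvEB (x :: y :: ys) = pvEB (y :: ys) := by simp [pvEB]
        have hSB : pvSB (x :: y :: ys) = true := by simp [pvSB, hx]
        constructor
        · rw [show pvGMode false (x :: y :: ys) = pvGMode false (y :: ys) by
            simp [pvGMode, hx]]
          rw [ih2, hR, hEB]
        · rw [show pvGMode true (x :: y :: ys) = "" :: pvGMode false (y :: ys) by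
            simp [pvGMode, hx]]
          rw [ih2, hR, hEB, hSB]
          by_cases hRn : pvR (y :: ys) = []
          · have hEBt : pvEB (y :: ys) = true := by
              have hall := (pvR_nil_iff (y :: ys)).mp hRn
              have hlast : (y :: ys).getLast (by simp) ∈ y :: ys := List.getLast_mem _
              simp [pvEB, List.getLast?_eq_some_getLast]
              exact hall _ hlast
            simp [hRn, hEBt, List.intercalate]
          · simp [hRn]
    · replace hx : pvBlank x = false := by simpa using hx
      have hRne : pvR (x :: xs) ≠ [] := by
        intro hc
        have := (pvR_nil_iff (x :: xs)).mp hc x (List.mem_cons_self ..)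
        simp [hx] at this
      have hG2 : pvGMode false (x :: xs) = x :: pvGMode true xs := by simp [pvGMode, hx]
      have hG1 : pvGMode true (x :: xs) = x :: pvGMode true xs := by simp [pvGMode, hx]
      have hgoal : x :: pvGMode true xs =
          List.intercalate [""] (pvR (x :: xs)) ++
            (if pvEB (x :: xs) = true ∧ pvR (x :: xs) ≠ [] then [""] else []) := by
        cases xs with
        | nil =>
          rw [pvR_new x [] hx (Or.inl rfl)]
          simp [pvGMode, pvEB, pvR, pvGroupBy, List.intercalate, hx]
        | cons y ys =>
          have hEB : pvEB (x :: y :: ys) = pvEB (y :: ys) := by simp [pvEB]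
          by_cases hsb : pvSB (y :: ys) = true
          · rw [pvR_new x (y :: ys) hx (Or.inr hsb), ih1, hEB, hsb]
            by_cases hRn : pvR (y :: ys) = []
            · have hEBt : pvEB (y :: ys) = true := by
                have hall := (pvR_nil_iff (y :: ys)).mp hRn
                have hlast : (y :: ys).getLast (by simp) ∈ y :: ys := List.getLast_mem _
                simp [pvEB, List.getLast?_eq_some_getLast]
                exact hall _ hlast
              simp [hRn, hEBt, List.intercalate]
            · rw [pvInter_cons _ _ hRn]
              simp [hRn]
          · obtain ⟨g, gs, hRls, hRx⟩ :=
              pvR_merge x (y :: ys) hx (by simp) (by simpa using hsb)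
            rw [hRx, ih1, hRls, hEB, pvInter_cons_head]
            simp [hsb]
      refine ⟨by rw [hG2]; exact hgoal, ?_⟩
      rw [hG1, hgoal]
      have hSBx : pvSB (x :: xs) = false := by simp [pvSB, hx]
      simp [hSBx, hRne]

def pvModeA (acc : List String) : Bool := !((acc.getLast?.map pvBlank).getD true)

theorem pvPyGet_last (acc : List String) : PySem.List.pyGet? acc (-1) = acc.getLast? := by
  simp [PySem.List.pyGet?, PySem.List.pyIdx?]
  cases acc with
  | nil => simp
  | cons a as => simp [List.getLast?_eq_getElem?]

theorem pvBlank_empty : pvBlank "" = true := by rfl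

theorem pvModeA_append (acc : List String) (x : String) :
    pvModeA (acc ++ [x]) = !pvBlank x := by
  simp [pvModeA]

theorem pvStepA_nonblank (acc : List String) (x : String) (hx : pvBlank x = false) :
    pvStepA acc x = acc ++ [x] := by
  have : PySem.Str.strip x ≠ "" := by simpa [pvBlank] using hx
  simp [pvStepA, this]

theorem pvStepA_blank_mode (acc : List String) (x : String) (hx : pvBlank x = true)
    (hm : pvModeA acc = true) : pvStepA acc x = acc ++ [""] := by
  have hstrip : PySem.Str.strip x = "" := by simpa [pvBlank] using hx
  obtain ⟨l, hl⟩ : ∃ l, acc.getLast? = some l := by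
    cases h : acc.getLast? with
    | none => simp [pvModeA, h] at hm
    | some l => exact ⟨l, rfl⟩
  have hlb : pvBlank l = false := by simpa [pvModeA, hl] using hm
  have hne : acc ≠ [] := by rintro rfl; simp at hl
  have hget : (PySem.List.pyGet? acc (-1)).getD "" = l := by rw [pvPyGet_last, hl]; rfl
  have hl' : PySem.Str.strip l ≠ "" := by simpa [pvBlank] using hlb
  simp [pvStepA, hstrip, hne, hget, hl']

theorem pvStepA_blank_nomode (acc : List String) (x : String) (hx : pvBlank x = true)
    (hm : pvModeA acc = false) : pvStepA acc x = acc := by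
  have hstrip : PySem.Str.strip x = "" := by simpa [pvBlank] using hx
  rcases eq_or_ne acc [] with rfl | hne
  · simp [pvStepA, hstrip]
  · obtain ⟨l, hl⟩ : ∃ l, acc.getLast? = some l := by
      cases h : acc.getLast? with
      | none => exact absurd (List.getLast?_eq_none_iff.mp h) hne
      | some l => exact ⟨l, rfl⟩
    have hlb : pvBlank l = true := by simpa [pvModeA, hl] using hm
    have hget : (PySem.List.pyGet? acc (-1)).getD "" = l := by rw [pvPyGet_last, hl]; rfl
    have hl' : PySem.Str.strip l = "" := by simpa [pvBlank] using hlb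
    simp [pvStepA, hstrip, hget, hl']

theorem pvFoldl_eq (ls : List String) (acc : List String) :
    ls.foldl pvStepA acc = acc ++ pvGMode (pvModeA acc) ls := by
  induction ls generalizing acc with
  | nil => cases h : pvModeA acc <;> simp [pvGMode]
  | cons x xs ih =>
    rw [List.foldl_cons, ih]
    by_cases hx : pvBlank x = true
    · by_cases hm : pvModeA acc = true
      · rw [pvStepA_blank_mode acc x hx hm, hm]
        rw [show pvModeA (acc ++ [""]) = false by
          rw [pvModeA_append]; simp [pvBlank_empty]]
        simp [pvGMode, hx]
      · replace hm : pvModeA acc = false := by simpa using hm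
        rw [pvStepA_blank_nomode acc x hx hm, hm]
        simp [pvGMode, hx]
    · replace hx : pvBlank x = false := by simpa using hx
      rw [pvStepA_nonblank acc x hx, pvModeA_append]
      rw [hx]
      cases h : pvModeA acc <;> simp [pvGMode, hx]

theorem pvSjoin_nil (sep : String) : PySem.Str.join sep [] = "" := by
  apply String.toList_inj.mp
  simp [PySem.Str.toList_join, PySem.Chars.join, List.intercalate]

theorem pvSjoin_singleton (sep p : String) : PySem.Str.join sep [p] = p := by
  apply String.toList_inj.mp
  simp [PySem.Str.toList_join, PySem.Chars.join_singleton]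

theorem pvCjoin_append (sep : List Char) (l1 l2 : List (List Char)) (h1 : l1 ≠ [])
    (h2 : l2 ≠ []) :
    PySem.Chars.join sep (l1 ++ l2) = PySem.Chars.join sep l1 ++ sep ++ PySem.Chars.join sep l2 := by
  induction l1 with
  | nil => exact absurd rfl h1
  | cons a l1' ih =>
    cases l1' with
    | nil =>
      cases l2 with
      | nil => exact absurd rfl h2
      | cons b l2' => simp [PySem.Chars.join_cons_cons, PySem.Chars.join_singleton]
    | cons c l1'' =>
      have hstep : PySem.Chars.join sep ((a :: c :: l1'') ++ l2) =
          a ++ sep ++ PySem.Chars.join sep ((c :: l1'') ++ l2) := by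
        simp [PySem.Chars.join_cons_cons]
      rw [hstep, ih (by simp), PySem.Chars.join_cons_cons]
      simp

theorem pvSjoin_append (sep : String) (l1 l2 : List String) (h1 : l1 ≠ []) (h2 : l2 ≠ []) :
    PySem.Str.join sep (l1 ++ l2) = PySem.Str.join sep l1 ++ sep ++ PySem.Str.join sep l2 := by
  apply String.toList_inj.mp
  simp only [PySem.Str.toList_join, String.toList_append, List.map_append]
  exact pvCjoin_append sep.toList _ _ (by simpa using h1) (by simpa using h2)

theorem pvCstrip_newline (cs : List Char) :
    PySem.Chars.strip (cs ++ ['\n']) = PySem.Chars.strip cs := by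
  unfold PySem.Chars.strip PySem.Chars.lstrip PySem.Chars.rstrip
  rw [List.dropWhile_append]
  cases h : (cs.dropWhile PySem.Chars.isspace).isEmpty with
  | true =>
    simp [List.isEmpty_iff.mp h, show PySem.Chars.isspace '\n' = true from rfl]
  | false =>
    simp only [Bool.false_eq_true, if_false]
    rw [List.reverse_append]
    simp [show PySem.Chars.isspace '\n' = true from rfl]

theorem pvStrip_newline (s : String) :
    PySem.Str.strip (s ++ "\n") = PySem.Str.strip s := by
  apply String.toList_inj.mp
  rw [PySem.Str.toList_strip, PySem.Str.toList_strip, String.toList_append]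
  exact pvCstrip_newline s.toList

theorem pvIntercalate_ne_nil (rs : List (List String)) (h : rs ≠ [])
    (h2 : ∀ r ∈ rs, r ≠ []) : List.intercalate ([""] : List String) rs ≠ [] := by
  cases rs with
  | nil => exact absurd rfl h
  | cons r rs' =>
    have hr : r ≠ [] := h2 r (List.mem_cons_self ..)
    cases rs' with
    | nil => simpa [pvInter_single] using hr
    | cons q qs =>
      rw [pvInter_cons _ _ (by simp)]
      simp

theorem pvSjoin_cons_cons (sep p q : String) (rest : List String) :
    PySem.Str.join sep (p :: q :: rest) = p ++ sep ++ PySem.Str.join sep (q :: rest) := by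
  apply String.toList_inj.mp
  simp [PySem.Str.toList_join, String.toList_append, PySem.Chars.join_cons_cons]

theorem pvJoin_intercalate (rs : List (List String)) (h : ∀ r ∈ rs, r ≠ []) :
    PySem.Str.join "\n" (List.intercalate [""] rs) =
      PySem.Str.join "\n\n" (rs.map (PySem.Str.join "\n")) := by
  induction rs with
  | nil =>
    rw [show [""].intercalate ([] : List (List String)) = [] from rfl, List.map_nil,
      pvSjoin_nil, pvSjoin_nil]
  | cons r rs' ih =>
    cases rs' with
    | nil => rw [pvInter_single]; simp [pvSjoin_singleton]
    | cons q qs =>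
      have hr : r ≠ [] := h r (List.mem_cons_self ..)
      have hrest : ∀ r' ∈ q :: qs, r' ≠ [] := fun r' hr' => h r' (List.mem_cons_of_mem _ hr')
      have hin : List.intercalate ([""] : List String) (q :: qs) ≠ [] :=
        pvIntercalate_ne_nil _ (by simp) hrest
      rw [pvInter_cons _ _ (by simp),
        show r ++ [""] ++ List.intercalate [""] (q :: qs) =
          r ++ ([""] ++ List.intercalate [""] (q :: qs)) by simp,
        pvSjoin_append _ _ _ hr (by simp), pvSjoin_append _ _ _ (by simp) hin,
        pvSjoin_singleton, ih hrest,
        show List.map (PySem.Str.join "\n") (r :: q :: qs) =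
          PySem.Str.join "\n" r :: PySem.Str.join "\n" q :: List.map (PySem.Str.join "\n") qs
          from rfl,
        pvSjoin_cons_cons]
      apply String.toList_inj.mp
      simp [String.toList_append]

theorem pvMain (ls : List String) :
    PySem.Str.strip (PySem.Str.join "\n" (ls.foldl pvStepA [])) =
      PySem.Str.strip (PySem.Str.join "\n\n"
        (((pvGroupBy pvBlank ls).filter (fun p => !p.1)).map (fun p => PySem.Str.join "\n" p.2))) := by
  have hB : ((pvGroupBy pvBlank ls).filter (fun p => !p.1)).map (fun p => PySem.Str.join "\n" p.2)
      = (pvR ls).map (PySem.Str.join "\n") := by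
    unfold pvR
    rw [List.map_map]
    rfl
  rw [hB, pvFoldl_eq ls [], show pvModeA [] = false from rfl, List.nil_append, (pvGMode_eq ls).1]
  have hall : ∀ r ∈ pvR ls, r ≠ [] := fun r hr => pvR_ne_nil_elem ls r hr
  by_cases hRn : pvR ls = []
  · rw [hRn]
    simp [List.intercalate, pvSjoin_nil]
  · by_cases hEB : pvEB ls = true
    · rw [if_pos ⟨hEB, hRn⟩,
        pvSjoin_append _ _ _ (pvIntercalate_ne_nil _ hRn hall) (by simp), pvSjoin_singleton,
        show ∀ s : String, s ++ "\n" ++ "" = s ++ "\n" from fun s => by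
          apply String.toList_inj.mp; simp [String.toList_append],
        pvStrip_newline, pvJoin_intercalate _ hall]
    · rw [if_neg (fun hc => hEB hc.1), List.append_nil, pvJoin_intercalate _ hall]

-- ===== VERDICT (by name: the statement is the Claim_ definition above) =====
theorem clean_context_py_spec : Claim_equal_clean_context_py := by
  intro text _
  unfold Spec_clean_context_py clean_context_py clean_context_py_alt
  simp only []
  exact pvMain _
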